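-- pv_equiv track=rewrite | github.com/nijatjafarov/qa-systems-with-bidaf-and-bert | data/squad_loader.py | _find_answer_span
-- ===== SOURCE A (Python) =====
-- def _find_answer_span(context, start_char, end_char, context_tokens):
--     # Approximate mapping from character span to token indices
--     pos = 0
--     token_starts = []
--     token_ends = []
--     for token in context_tokens:
--         token_starts.append(pos)
--         pos += len(token) + 1  # +1 for space
--         token_ends.append(pos - 2)  # last char index of token
--     start_idx = None
--     end_idx = None
--     for i, (s, e) in enumerate(zip(token_starts, token_ends)):
--         if s <= start_char <= e:
--             start_idx = i
--         if s <= end_char <= e: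
--             end_idx = i
--     if start_idx is None or end_idx is None:
--         return None, None
--     return start_idx, end_idx
-- ===== SOURCE B (Python) =====
-- def _find_answer_span(context, start_char, end_char, context_tokens):
--     # Token character ranges are disjoint and increasing, so the (unique)
--     # containing token can be found directly with an early-returning scan.
--     def locate(c):
--         pos = 0
--         for i, token in enumerate(context_tokens):
--             end = pos + len(token) - 1
--             if pos <= c <= end:
--                 return i
--             pos = end + 2
--         return None
--     start_idx = locate(start_char)
--     end_idx = locate(end_char)
--     if start_idx is None or end_idx is None:
--         return None, None
--     return start_idx, end_idx
-- ===== Notes on version B (the rewrite author's own statement) =====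
-- stated objective: faster
-- what changed: Instead of building token_starts/token_ends lists and then doing a full last-match scan over their zip, B uses one early-returning locate(c) helper (called once per character position) that walks the tokens with a running pos and stops at the first containing range; equivalent because the token ranges are disjoint and strictly increasing, so the last match equals the first (and only) match; no intermediate lists and early exit give a constant-factor speedup.
import Mathlib
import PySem

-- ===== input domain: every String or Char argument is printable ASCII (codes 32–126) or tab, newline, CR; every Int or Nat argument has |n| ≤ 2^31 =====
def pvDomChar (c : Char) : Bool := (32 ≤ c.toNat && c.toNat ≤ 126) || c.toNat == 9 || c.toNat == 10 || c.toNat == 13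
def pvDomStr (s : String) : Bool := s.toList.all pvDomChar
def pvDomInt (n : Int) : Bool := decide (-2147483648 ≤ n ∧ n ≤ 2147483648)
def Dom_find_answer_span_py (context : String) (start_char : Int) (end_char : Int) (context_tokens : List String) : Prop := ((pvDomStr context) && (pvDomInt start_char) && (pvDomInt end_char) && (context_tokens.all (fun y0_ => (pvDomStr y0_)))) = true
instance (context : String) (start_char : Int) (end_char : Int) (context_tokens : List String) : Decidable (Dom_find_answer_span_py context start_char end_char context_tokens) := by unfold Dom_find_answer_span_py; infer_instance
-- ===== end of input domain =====

-- B replaces A's build-two-lists-then-last-match scan by a direct early-returning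
-- locate helper per character position (simpler; valid because token ranges are
-- disjoint and increasing, so the last match equals the first match).

-- ===== PORT A =====
def find_answer_span_py (context : String) (start_char : Int) (end_char : Int) (context_tokens : List String) : Option Int × Option Int :=
  -- first loop: build token_starts / token_ends with running pos
  let st := context_tokens.foldl
      (fun (acc : Int × List Int × List Int) token =>
        let starts := acc.2.1 ++ [acc.1]
        let pos := acc.1 + PySem.Str.len token + 1
        let ends := acc.2.2 ++ [pos - 2]
        (pos, starts, ends))
      (0, [], [])
  -- second loop: for i, (s, e) in enumerate(zip(token_starts, token_ends))
  let scan := (PySem.List.enumerate (st.2.1.zip st.2.2) 0).foldl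
      (fun (acc : Option Int × Option Int) (p : Int × (Int × Int)) =>
        (if p.2.1 ≤ start_char ∧ start_char ≤ p.2.2 then some p.1 else acc.1,
         if p.2.1 ≤ end_char ∧ end_char ≤ p.2.2 then some p.1 else acc.2))
      (none, none)
  match scan with
  | (some si, some ei) => (some si, some ei)
  | _ => (none, none)

-- ===== PORT B =====
-- locate(c): early-returning scan with running pos (i is the enumerate counter)
def pvLocate (c : Int) : Int → Int → List String → Option Int
  | _, _, [] => none
  | i, pos, token :: rest =>
    let e := pos + PySem.Str.len token - 1
    if pos ≤ c ∧ c ≤ e then some i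
    else pvLocate c (i + 1) (e + 2) rest

def find_answer_span_py_alt (context : String) (start_char : Int) (end_char : Int) (context_tokens : List String) : Option Int × Option Int :=
  let start_idx := pvLocate start_char 0 0 context_tokens
  let end_idx := pvLocate end_char 0 0 context_tokens
  if start_idx = none ∨ end_idx = none then (none, none) else (start_idx, end_idx)

-- ===== PRECONDITION & SPEC =====
def Spec_find_answer_span_py (context : String) (start_char : Int) (end_char : Int) (context_tokens : List String) (out : Option Int × Option Int) : Prop := out = find_answer_span_py_alt context start_char end_char context_tokens
instance (context : String) (start_char : Int) (end_char : Int) (context_tokens : List String) (out : Option Int × Option Int) : Decidable (Spec_find_answer_span_py context start_char end_char context_tokens out) := by unfold Spec_find_answer_span_py; infer_instance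

-- ===== CLAIM (what is proved, stated in full; the proofs are below) =====
def Claim_equal_find_answer_span_py : Prop := ∀ (context : String) (start_char : Int) (end_char : Int) (context_tokens : List String), Dom_find_answer_span_py context start_char end_char context_tokens → Spec_find_answer_span_py context start_char end_char context_tokens (find_answer_span_py context start_char end_char context_tokens)

-- ===== LEMMAS AND PROOFS =====

-- the (start, end) character range of each token, starting at position pos
def pvRanges : Int → List String → List (Int × Int)
  | _, [] => []
  | pos, t :: ts => (pos, pos + PySem.Str.len t - 1) :: pvRanges (pos + PySem.Str.len t + 1) ts

-- characterisation of A's first loop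
theorem pvPhase1 (ts : List String) : ∀ (pos : Int) (S E : List Int),
    (ts.foldl (fun (acc : Int × List Int × List Int) token =>
        (acc.1 + PySem.Str.len token + 1,
         acc.2.1 ++ [acc.1],
         acc.2.2 ++ [acc.1 + PySem.Str.len token + 1 - 2])) (pos, S, E)).2
      = (S ++ (pvRanges pos ts).map Prod.fst, E ++ (pvRanges pos ts).map Prod.snd) := by
  induction ts with
  | nil => intro pos S E; simp [pvRanges]
  | cons t ts ih =>
    intro pos S E
    simp only [List.foldl_cons, pvRanges, List.map_cons]
    rw [ih]
    have h2 : pos + PySem.Str.len t + 1 - 2 = pos + PySem.Str.len t - 1 := by ring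
    rw [h2]
    simp

theorem pvZipMap {α β : Type} (l : List (α × β)) :
    (l.map Prod.fst).zip (l.map Prod.snd) = l := by
  induction l with
  | nil => rfl
  | cons p l ih => simp [ih]

-- the pair fold is the pair of the two component folds
def pvScan (c : Int) (l : List (Int × (Int × Int))) (acc : Option Int) : Option Int :=
  l.foldl (fun a p => if p.2.1 ≤ c ∧ c ≤ p.2.2 then some p.1 else a) acc

theorem pvSplit (sc ec : Int) (l : List (Int × (Int × Int))) : ∀ (a b : Option Int),
    l.foldl (fun (acc : Option Int × Option Int) (p : Int × (Int × Int)) =>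
        (if p.2.1 ≤ sc ∧ sc ≤ p.2.2 then some p.1 else acc.1,
         if p.2.1 ≤ ec ∧ ec ≤ p.2.2 then some p.1 else acc.2)) (a, b)
      = (pvScan sc l a, pvScan ec l b) := by
  induction l with
  | nil => intro a b; rfl
  | cons p l ih => intro a b; simp only [List.foldl_cons, pvScan] at *; rw [ih]

theorem pvLenNonneg (t : String) : 0 ≤ PySem.Str.len t := by
  simp [PySem.Str.len_eq]

-- no token range starting at or after pos can contain c < pos
theorem pvScanNone (c : Int) (ts : List String) : ∀ (pos i : Int) (acc : Option Int),
    c < pos → pvScan c (PySem.List.enumerate (pvRanges pos ts) i) acc = acc := by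
  induction ts with
  | nil => intro pos i acc _; rfl
  | cons t ts ih =>
    intro pos i acc h
    have hl := pvLenNonneg t
    simp only [pvRanges, PySem.List.enumerate_cons, pvScan, List.foldl_cons]
    rw [if_neg (by omega)]
    exact ih (pos + PySem.Str.len t + 1) (i + 1) acc (by omega)

-- A's last-match scan over the ranges equals B's early-returning locate
theorem pvScanEqLocate (c : Int) (ts : List String) : ∀ (pos i : Int) (acc : Option Int),
    pvScan c (PySem.List.enumerate (pvRanges pos ts) i) acc
      = match pvLocate c i pos ts with
        | some j => some j
        | none => acc := by
  induction ts with
  | nil => intro pos i acc; rfl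
  | cons t ts ih =>
    intro pos i acc
    have hl := pvLenNonneg t
    simp only [pvRanges, PySem.List.enumerate_cons, pvScan, List.foldl_cons, pvLocate]
    by_cases h : pos ≤ c ∧ c ≤ pos + PySem.Str.len t - 1
    · rw [if_pos h, if_pos h]
      exact pvScanNone c ts (pos + PySem.Str.len t + 1) (i + 1) (some i) (by omega)
    · rw [if_neg h, if_neg h]
      have he : pos + PySem.Str.len t - 1 + 2 = pos + PySem.Str.len t + 1 := by ring
      rw [he]
      have := ih (pos + PySem.Str.len t + 1) (i + 1) acc
      simpa [pvScan] using this

-- ===== VERDICT (by name: the statement is the Claim_ definition above) =====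
theorem find_answer_span_py_spec : Claim_equal_find_answer_span_py := by
  intro context sc ec ts _
  unfold Spec_find_answer_span_py find_answer_span_py find_answer_span_py_alt
  have h1 := pvPhase1 ts 0 [] []
  simp only [List.nil_append] at h1
  have h1' : (ts.foldl (fun (acc : Int × List Int × List Int) token =>
        (acc.1 + PySem.Str.len token + 1,
         acc.2.1 ++ [acc.1],
         acc.2.2 ++ [acc.1 + PySem.Str.len token + 1 - 2])) (0, [], [])).2
      = ((pvRanges 0 ts).map Prod.fst, (pvRanges 0 ts).map Prod.snd) := h1
  show (match ((PySem.List.enumerate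
        (((ts.foldl _ ((0 : Int), ([] : List Int), ([] : List Int))).2.1).zip
          ((ts.foldl _ ((0 : Int), ([] : List Int), ([] : List Int))).2.2)) 0).foldl _
        ((none : Option Int), (none : Option Int))) with
      | (some si, some ei) => (some si, some ei)
      | _ => ((none : Option Int), (none : Option Int))) = _
  rw [show ((ts.foldl (fun (acc : Int × List Int × List Int) token =>
        (acc.1 + PySem.Str.len token + 1,
         acc.2.1 ++ [acc.1],
         acc.2.2 ++ [acc.1 + PySem.Str.len token + 1 - 2])) (0, [], [])).2.1)
      = (pvRanges 0 ts).map Prod.fst from congrArg Prod.fst h1',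
     show ((ts.foldl (fun (acc : Int × List Int × List Int) token =>
        (acc.1 + PySem.Str.len token + 1,
         acc.2.1 ++ [acc.1],
         acc.2.2 ++ [acc.1 + PySem.Str.len token + 1 - 2])) (0, [], [])).2.2)
      = (pvRanges 0 ts).map Prod.snd from congrArg Prod.snd h1',
     pvZipMap, pvSplit sc ec, pvScanEqLocate sc ts 0 0 none, pvScanEqLocate ec ts 0 0 none]
  cases pvLocate sc 0 0 ts <;> cases pvLocate ec 0 0 ts <;> simp
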